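-- pv_equiv track=rewrite | github.com/andmedina/aptafind | features_v2.py | extract_substructures
-- ===== SOURCE A (Python) =====
-- def extract_substructures(sequence):
--     hairpin_loops = []
--     internal_loops = []
--     bulges = []
--
--     # Track the start and end positions of the substructure
--     start_pos = None
--
--     for i, char in enumerate(sequence):
--         if char == "(":
--             # Found an opening bracket, start or extend the substructure
--             if start_pos is None:
--                 start_pos = i
--         elif char == ")":
--             # Found a closing bracket, check if we have a substructure
--             if start_pos is not None:
--                 end_pos = i + 1
--                 loop_sequence = sequence[start_pos:end_pos]
--                 if loop_sequence.count(".") >= 2:  # Check for at least two dots on one side of the bracket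
--                     if "(" in loop_sequence and ")" in loop_sequence:
--                         internal_loops.append(loop_sequence)
--                     else:
--                         bulges.append(loop_sequence)
--                 else:
--                     hairpin_loops.append(loop_sequence)
--
--             # Reset the start position
--             start_pos = None
--
--     return hairpin_loops, internal_loops, bulges
-- ===== SOURCE B (Python) =====
-- def extract_substructures(sequence):
--     # staged passes: split the string on ')', recover each fragment's segment from its
--     # first '(' (if any), then classify all segments at once by dot count
--     segments = []
--     for piece in sequence.split(")")[:-1]:
--         j = piece.find("(")
--         if j != -1:
--             segments.append(piece[j:] + ")")
--     hairpin_loops = [g for g in segments if g.count(".") < 2]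
--     internal_loops = [g for g in segments if g.count(".") >= 2]
--     return hairpin_loops, internal_loops, []
-- ===== Notes on version B (the rewrite author's own statement) =====
-- stated objective: faster
-- what changed: replaces A's per-character index/start_pos state machine with staged passes: split the string on ')' (C-level str.split), recover each fragment's segment from its first '(' via find/slicing, then classify all segments afterwards with two filter comprehensions; A's dead bulge branch (its bracket test is always true) becomes a constant empty list
import Mathlib
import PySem

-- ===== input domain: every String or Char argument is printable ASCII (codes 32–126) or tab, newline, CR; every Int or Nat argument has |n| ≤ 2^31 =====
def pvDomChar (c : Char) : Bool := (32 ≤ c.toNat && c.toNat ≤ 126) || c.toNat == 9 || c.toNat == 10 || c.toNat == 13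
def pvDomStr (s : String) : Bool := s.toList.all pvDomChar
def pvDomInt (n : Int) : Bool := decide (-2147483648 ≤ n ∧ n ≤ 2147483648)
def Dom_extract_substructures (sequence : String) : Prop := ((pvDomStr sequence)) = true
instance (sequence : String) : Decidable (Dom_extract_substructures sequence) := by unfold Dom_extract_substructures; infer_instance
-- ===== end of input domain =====

-- B replaces A's one-pass index/start_pos state machine with staged passes: split on ')',
-- recover each fragment's segment from its first '(', then classify by two filters
-- (measurably faster via C-level split/find; same return value everywhere; B drops A's dead bulge branch).

-- ===== PORT A =====
-- literal port of A's enumerate loop: index i, start_pos state, slice sequence[start_pos:i+1]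
def goA (cs : List Char) (i : Nat) (rest : List Char) (start : Option Nat)
    (h ip b : List String) : List String × List String × List String :=
  match rest with
  | [] => (h, ip, b)
  | c :: rest' =>
    if c = '(' then
      goA cs (i+1) rest' (if start = none then some i else start) h ip b
    else if c = ')' then
      match start with
      | some s =>
        let seg : List Char := PySem.List.slice cs (some (s : Int)) (some ((i : Int) + 1))
        if 2 ≤ PySem.Chars.count seg ['.'] then
          if PySem.Chars.isIn ['('] seg && PySem.Chars.isIn [')'] seg then
            goA cs (i+1) rest' none h (ip ++ [String.ofList seg]) b
          else
            goA cs (i+1) rest' none h ip (b ++ [String.ofList seg])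
        else
          goA cs (i+1) rest' none (h ++ [String.ofList seg]) ip b
      | none => goA cs (i+1) rest' none h ip b
    else
      goA cs (i+1) rest' start h ip b

def extract_substructures (sequence : String) : List String × List String × List String :=
  goA sequence.toList 0 sequence.toList none [] [] []

-- ===== PORT B =====
-- loop body of Source B's for-loop over the split pieces: j = piece.find("(");
-- if j != -1: segments.append(piece[j:] + ")")
def bStep (acc : List String) (piece : List Char) : List String :=
  let j := PySem.Chars.find piece ['(']
  if j ≠ -1 then acc ++ [String.ofList (PySem.Chars.slice piece (some j) none ++ [')'])] else acc

-- sequence.split(")")[:-1] (the list slice [:-1] is List.dropLast, exact), then the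
-- segment-collecting loop, then the two filter comprehensions
def extract_substructures_alt (sequence : String) : List String × List String × List String :=
  let pieces := (PySem.Chars.splitOn sequence.toList [')']).dropLast
  let segments := pieces.foldl bStep []
  (segments.filter (fun g => PySem.Str.count g "." < 2),
   segments.filter (fun g => 2 ≤ PySem.Str.count g "."), [])

-- ===== PRECONDITION & SPEC =====
def Spec_extract_substructures (sequence : String) (out : List String × List String × List String) : Prop := out = extract_substructures_alt sequence
instance (sequence : String) (out : List String × List String × List String) : Decidable (Spec_extract_substructures sequence out) := by unfold Spec_extract_substructures; infer_instance

-- ===== CLAIM (what is proved, stated in full; the proofs are below) =====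
def Claim_equal_extract_substructures : Prop := ∀ (sequence : String), Dom_extract_substructures sequence → Spec_extract_substructures sequence (extract_substructures sequence)

-- ===== LEMMAS AND PROOFS =====

-- the common middle ground: the list of '('-to-next-')' segments of the string
def bGo (cs : List Char) : List (List Char) :=
  let t := cs.dropWhile (· ≠ '(')
  let u := t.tail.dropWhile (· ≠ ')')
  if t.isEmpty ∨ u.isEmpty then []
  else (t.headI :: (t.tail.takeWhile (· ≠ ')') ++ [u.headI])) :: bGo u.tail
termination_by cs.length
decreasing_by
  rename_i h
  rw [not_or, List.isEmpty_iff, List.isEmpty_iff] at h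
  have h4 := List.length_pos_of_ne_nil h.1
  have h5 := List.length_pos_of_ne_nil h.2
  have h1 : t.length ≤ cs.length := List.length_dropWhile_le _ _
  have h2 : u.length ≤ t.tail.length := List.length_dropWhile_le _ _
  have h8 : t.tail.length = t.length - 1 := List.length_tail
  have h9 : u.tail.length = u.length - 1 := List.length_tail
  show u.tail.length < cs.length
  omega

-- A's per-')' classification, as a fold over segments
def classifyFold (acc : List String × List String) (seg : List Char) : List String × List String :=
  if 2 ≤ PySem.Chars.count seg ['.'] then (acc.1, acc.2 ++ [String.ofList seg])
  else (acc.1 ++ [String.ofList seg], acc.2)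

-- classify the remaining segments starting from accumulators (h, ip, b)
def finishSegs (h ip b : List String) (segs : List (List Char)) :
    List String × List String × List String :=
  ((segs.foldl classifyFold (h, ip)).1, (segs.foldl classifyFold (h, ip)).2, b)

-- reference split of a string at every ')'
def mySplit (l : List Char) : List (List Char) :=
  if h : ')' ∈ l then
    l.takeWhile (· ≠ ')') :: mySplit ((l.dropWhile (· ≠ ')')).tail)
  else [l]
termination_by l.length
decreasing_by
  have hne : l.dropWhile (· ≠ ')') ≠ [] := by
    rw [Ne, List.dropWhile_eq_nil_iff]
    intro hall
    have := hall ')' h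
    simp at this
  have h1 : (l.dropWhile (· ≠ ')')).length ≤ l.length := List.length_dropWhile_le _ _
  have h2 := List.length_pos_of_ne_nil hne
  have h3 : ((l.dropWhile (· ≠ ')')).tail).length = (l.dropWhile (· ≠ ')')).length - 1 :=
    List.length_tail
  omega

def consFirst (p : List Char) : List (List Char) → List (List Char)
  | [] => [p]
  | x :: xs => (p ++ x) :: xs

theorem singleton_infix_of_mem {a : Char} {l : List Char} (h : a ∈ l) : [a] <:+: l := by
  obtain ⟨s, t, rfl⟩ := List.append_of_mem h
  exact ⟨s, t, by simp⟩

theorem mySplit_ne_nil (l : List Char) : mySplit l ≠ [] := by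
  rw [mySplit.eq_def]
  split <;> simp

theorem mySplit_close (rest : List Char) : mySplit (')' :: rest) = [] :: mySplit rest := by
  rw [mySplit.eq_def]
  have hmem : ')' ∈ ')' :: rest := List.mem_cons_self
  rw [dif_pos hmem]
  simp

theorem mySplit_cons_ne (c : Char) (rest : List Char) (hc : ¬ c = ')') :
    mySplit (c :: rest) = consFirst [c] (mySplit rest) := by
  conv_lhs => rw [mySplit.eq_def]
  by_cases hm : ')' ∈ rest
  · have hmem : ')' ∈ c :: rest := List.mem_cons_of_mem _ hm
    rw [dif_pos hmem]
    rw [List.takeWhile_cons_of_pos (by simpa using hc), List.dropWhile_cons_of_pos (by simpa using hc)]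
    conv_rhs => rw [mySplit.eq_def, dif_pos hm]
    rfl
  · have hmem : ¬ ')' ∈ c :: rest := by
      simp [hm]
      exact fun he => hc he.symm
    rw [dif_neg hmem]
    conv_rhs => rw [mySplit.eq_def, dif_neg hm]
    rfl

theorem consFirst_consFirst (p q : List Char) (ms : List (List Char)) :
    consFirst p (consFirst q ms) = consFirst (p ++ q) ms := by
  cases ms <;> simp [consFirst]

theorem consFirst_nil_of_ne (ms : List (List Char)) (h : ms ≠ []) : consFirst [] ms = ms := by
  cases ms with
  | nil => exact absurd rfl h
  | cons x xs => simp [consFirst]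

-- splitOn.go computes acc.reverse ++ (cur.reverse glued onto the reference split)
theorem splitOn_go_eq : ∀ (fuel : Nat) (l cur : List Char) (acc : List (List Char)),
    l.length < fuel →
    PySem.Chars.splitOn.go [')'] fuel l cur acc = acc.reverse ++ consFirst cur.reverse (mySplit l) := by
  intro fuel
  induction fuel with
  | zero => intro l cur acc h; omega
  | succ f IH =>
    intro l cur acc h
    cases l with
    | nil =>
      have hms : mySplit [] = [[]] := by rw [mySplit.eq_def]; simp
      rw [PySem.Chars.splitOn.go] <;> simp [hms, consFirst]
    | cons c rest =>
      rw [PySem.Chars.splitOn.go]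
      by_cases hc : c = ')'
      · subst hc
        have hpre : [')'].isPrefixOf (')' :: rest) = true := by simp [List.isPrefixOf]
        rw [if_pos hpre]
        have hlen : rest.length < f := by simpa using h
        rw [show (List.drop [')'].length (')' :: rest)) = rest by simp]
        rw [IH rest [] (cur.reverse :: acc) hlen, mySplit_close]
        cases hms : mySplit rest with
        | nil => exact absurd hms (mySplit_ne_nil rest)
        | cons x xs => simp [consFirst]
      · have hpre : [')'].isPrefixOf (c :: rest) = false := by
          simp [List.isPrefixOf]
          exact fun he => hc he.symm
        rw [hpre]
        simp only [Bool.false_eq_true, if_false]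
        have hlen : rest.length < f := by simpa using h
        rw [IH rest (c :: cur) acc hlen]
        rw [mySplit_cons_ne c rest hc, consFirst_consFirst]
        simp

theorem splitOn_eq_mySplit (l : List Char) :
    PySem.Chars.splitOn l [')'] = mySplit l := by
  unfold PySem.Chars.splitOn
  rw [splitOn_go_eq (l.length + 1) l [] [] (by omega)]
  simp [consFirst_nil_of_ne _ (mySplit_ne_nil l)]

theorem bGo_nil : bGo [] = [] := by
  rw [bGo.eq_def]; simp

theorem bGo_cons_ne (c : Char) (cs : List Char) (hc : ¬ c = '(') :
    bGo (c :: cs) = bGo cs := by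
  conv_lhs => rw [bGo.eq_def]
  conv_rhs => rw [bGo.eq_def]
  rw [List.dropWhile_cons_of_pos (by simpa using hc)]

theorem bGo_no_close (l : List Char) (h : ')' ∉ l) : bGo l = [] := by
  rw [bGo.eq_def]
  have hsub : ∀ x ∈ (l.dropWhile (· ≠ '(')).tail, x ∈ l := by
    intro x hx
    have h1 : (l.dropWhile (· ≠ '(')).tail ⊆ l.dropWhile (· ≠ '(') := List.tail_subset _
    exact (List.dropWhile_suffix _).subset (h1 hx)
  have hdrop : ((l.dropWhile (· ≠ '(')).tail).dropWhile (· ≠ ')') = [] := by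
    rw [List.dropWhile_eq_nil_iff]
    intro x hx
    simp only [ne_eq, decide_eq_true_eq]
    intro he
    exact h (he ▸ hsub x hx)
  simp only [hdrop]
  simp

theorem bGo_open_close (mid rest : List Char) (hmid : ')' ∉ mid) :
    bGo ('(' :: (mid ++ ')' :: rest)) = ('(' :: (mid ++ [')'])) :: bGo rest := by
  rw [bGo.eq_def]
  have ht : ('(' :: (mid ++ ')' :: rest)).dropWhile (· ≠ '(') = '(' :: (mid ++ ')' :: rest) :=
    List.dropWhile_cons_of_neg (by simp)
  have hdropnil : mid.dropWhile (· ≠ ')') = [] := by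
    rw [List.dropWhile_eq_nil_iff]
    intro x hx
    simp only [ne_eq, decide_eq_true_eq]
    intro he; exact hmid (he ▸ hx)
  have htakeself : mid.takeWhile (· ≠ ')') = mid := by
    rw [List.takeWhile_eq_self_iff]
    intro x hx
    simp only [ne_eq, decide_eq_true_eq]
    intro he; exact hmid (he ▸ hx)
  have hdrop : (mid ++ ')' :: rest).dropWhile (· ≠ ')') = ')' :: rest := by
    rw [List.dropWhile_append, hdropnil]
    simp
  have htake : (mid ++ ')' :: rest).takeWhile (· ≠ ')') = mid := by
    rw [List.takeWhile_append, htakeself]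
    simp
  simp only [ht, List.tail_cons, hdrop, htake, List.headI_cons]
  simp

-- a piece before a ')' contributes its first-'(' suffix (if any) as one segment
theorem bGo_piece (mid rest : List Char) (hmid : ')' ∉ mid) :
    bGo (mid ++ ')' :: rest) =
      (if '(' ∈ mid then [mid.dropWhile (· ≠ '(') ++ [')']] else []) ++ bGo rest := by
  induction mid with
  | nil =>
    simp only [List.nil_append]
    rw [bGo_cons_ne ')' rest (by decide)]
    simp
  | cons c mid' IH =>
    by_cases hc : c = '('
    · subst hc
      have hmid' : ')' ∉ mid' := fun hm => hmid (List.mem_cons_of_mem _ hm)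
      rw [List.cons_append, bGo_open_close mid' rest hmid']
      have hmem : '(' ∈ '(' :: mid' := List.mem_cons_self
      rw [if_pos hmem]
      rw [List.dropWhile_cons_of_neg (by simp)]
      simp
    · have hmid' : ')' ∉ mid' := fun hm => hmid (List.mem_cons_of_mem _ hm)
      rw [List.cons_append, bGo_cons_ne c _ hc, IH hmid']
      have hmem : ('(' ∈ c :: mid') ↔ ('(' ∈ mid') := by
        simp [List.mem_cons]
        intro he; exact absurd he.symm hc
      by_cases hm : '(' ∈ mid'
      · rw [if_pos hm, if_pos (hmem.mpr hm)]
        rw [List.dropWhile_cons_of_pos (by simpa using hc)]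
      · rw [if_neg hm, if_neg (fun hx => hm (hmem.mp hx))]

-- drop at the first occurrence equals dropWhile
theorem dropWhile_eq_drop_of (c : Char) : ∀ (k : Nat) (l : List Char),
    (l.drop k).head? = some c → (∀ i < k, l[i]? ≠ some c) →
    l.dropWhile (· ≠ c) = l.drop k := by
  intro k
  induction k with
  | zero =>
    intro l hh _
    cases l with
    | nil => simp at hh
    | cons x xs =>
      simp only [List.drop_zero] at *
      simp only [List.head?_cons, Option.some.injEq] at hh
      subst hh
      rw [List.dropWhile_cons_of_neg (by simp)]
  | succ k IH =>
    intro l hh hmin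
    cases l with
    | nil => simp at hh
    | cons x xs =>
      have hx : ¬ x = c := by
        have := hmin 0 (by omega)
        simpa using this
      rw [List.dropWhile_cons_of_pos (by simpa using hx), List.drop_succ_cons]
      exact IH xs (by simpa using hh) (fun i hi => by
        have := hmin (i + 1) (by omega)
        simpa using this)

-- bStep on a ')'-free piece appends exactly the segment bGo_piece describes
theorem bStep_piece (acc : List String) (mid : List Char) :
    bStep acc mid =
      acc ++ (if '(' ∈ mid then [mid.dropWhile (· ≠ '(') ++ [')']] else []).map String.ofList := by
  unfold bStep
  by_cases hm : '(' ∈ mid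
  · have hinf : ['('] <:+: mid := singleton_infix_of_mem hm
    have hne : PySem.Chars.find mid ['('] ≠ -1 := by
      rw [Ne, PySem.Chars.find_eq_neg_one_iff]
      exact fun h => h hinf
    have hge : 0 ≤ PySem.Chars.find mid ['('] := by
      have := PySem.Chars.neg_one_le_find (s := mid) (sub := ['('])
      omega
    obtain ⟨hpre, hminp⟩ := PySem.Chars.find_spec hge
    have hslice : PySem.Chars.slice mid (some (PySem.Chars.find mid ['('])) none =
        mid.dropWhile (· ≠ '(') := by
      rw [PySem.Chars.slice_eq_listSlice, PySem.List.slice_from mid hge]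
      refine (dropWhile_eq_drop_of '(' _ mid ?_ ?_).symm
      · obtain ⟨t, ht⟩ := hpre
        rw [← ht]
        simp
      · intro i hi he
        obtain ⟨hlen, hgl⟩ := List.getElem?_eq_some_iff.mp he
        refine hminp i hi ⟨mid.drop (i + 1), ?_⟩
        rw [List.drop_eq_getElem_cons hlen, hgl]
        rfl
    rw [if_pos hne, hslice, if_pos hm]
    simp
  · have heq : PySem.Chars.find mid ['('] = -1 := by
      rw [PySem.Chars.find_eq_neg_one_iff]
      intro hinf
      exact hm (hinf.subset (by simp))
    rw [if_neg (by simpa using heq), if_neg hm]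
    simp

-- the split pieces, folded with bStep, produce exactly bGo's segments
theorem segs_from (l : List Char) : ∀ (acc : List String),
    ((mySplit l).dropLast).foldl bStep acc = acc ++ (bGo l).map String.ofList := by
  induction hn : l.length using Nat.strong_induction_on generalizing l with
  | _ n IHn =>
  intro acc
  subst hn
  by_cases hc : ')' ∈ l
  · have hne : l.dropWhile (· ≠ ')') ≠ [] := by
      rw [Ne, List.dropWhile_eq_nil_iff]
      intro hall
      have := hall ')' hc
      simp at this
    cases hcons : l.dropWhile (· ≠ ')') with
    | nil => exact absurd hcons hne
    | cons d restTail =>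
      have hd : d = ')' := by
        have h2 := List.head_dropWhile_not (fun x => decide (x ≠ ')')) hne
        simp only [hcons, List.head_cons] at h2
        simpa using h2
      subst hd
      have hmid : ')' ∉ l.takeWhile (· ≠ ')') := by
        intro hx
        have := List.mem_takeWhile_imp hx
        simp at this
      have hL : l = l.takeWhile (· ≠ ')') ++ ')' :: restTail := by
        conv_lhs => rw [← List.takeWhile_append_dropWhile (p := (· ≠ ')')) (l := l)]
        rw [hcons]
      have hms : mySplit l = l.takeWhile (· ≠ ')') :: mySplit restTail := by
        rw [mySplit.eq_def, dif_pos hc, hcons]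
        simp
      have hlt : restTail.length < l.length := by
        have h1 : (l.dropWhile (· ≠ ')')).length ≤ l.length := List.length_dropWhile_le _ _
        rw [hcons] at h1
        simp at h1
        omega
      rw [hms, List.dropLast_cons_of_ne_nil (mySplit_ne_nil restTail)]
      rw [List.foldl_cons]
      rw [IHn restTail.length hlt restTail rfl (bStep acc (l.takeWhile (· ≠ ')')))]
      rw [bStep_piece]
      conv_rhs => rw [hL, bGo_piece _ _ hmid]
      simp [List.append_assoc]
  · rw [mySplit.eq_def, dif_neg hc]
    simp [bGo_no_close l hc]

theorem finishSegs_step (h ip b : List String) (seg : List Char) (segs : List (List Char)) :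
    finishSegs h ip b (seg :: segs) =
      if 2 ≤ PySem.Chars.count seg ['.'] then finishSegs h (ip ++ [String.ofList seg]) b segs
      else finishSegs (h ++ [String.ofList seg]) ip b segs := by
  by_cases hc : 2 ≤ PySem.Chars.count seg ['.']
  · simp [finishSegs, List.foldl_cons, classifyFold, hc]
  · simp [finishSegs, List.foldl_cons, classifyFold, hc]

-- the classification fold, written as two filters
theorem classify_foldl (segs : List (List Char)) : ∀ (h ip : List String),
    segs.foldl classifyFold (h, ip) =
      (h ++ (segs.filter (fun g => PySem.Chars.count g ['.'] < 2)).map String.ofList,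
       ip ++ (segs.filter (fun g => 2 ≤ PySem.Chars.count g ['.'])).map String.ofList) := by
  induction segs with
  | nil => intro h ip; simp
  | cons seg rest IH =>
    intro h ip
    by_cases hc : 2 ≤ PySem.Chars.count seg ['.']
    · have hlt : ¬ PySem.Chars.count seg ['.'] < 2 := by omega
      simp only [List.foldl_cons, classifyFold, if_pos hc, List.filter_cons,
        decide_eq_true_eq]
      rw [IH]
      simp [hc, hlt]
    · have hlt : PySem.Chars.count seg ['.'] < 2 := by omega
      simp only [List.foldl_cons, classifyFold, if_neg hc, List.filter_cons,
        decide_eq_true_eq]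
      rw [IH]
      simp [hc, hlt]

-- the main invariant: the A-loop from any consistent state produces exactly the
-- classification of the remaining segments
theorem goA_eq (cs : List Char) : ∀ (rest : List Char) (i : Nat) (start : Option Nat)
    (h ip b : List String),
    cs.drop i = rest →
    (∀ s, start = some s →
      ∃ mid, ')' ∉ mid ∧ cs.drop s = '(' :: (mid ++ rest) ∧ i = s + 1 + mid.length) →
    goA cs i rest start h ip b =
      finishSegs h ip b (bGo (match start with | none => rest | some s => cs.drop s)) := by
  intro rest
  induction rest with
  | nil =>
    intro i start h ip b hdrop hinv
    match start with
    | none => simp [goA, bGo_nil, finishSegs]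
    | some s =>
      obtain ⟨mid, hm1, hm2, _⟩ := hinv s rfl
      simp only [List.append_nil] at hm2
      have hng : '(' :: mid = '(' :: mid := rfl
      have hb : bGo (cs.drop s) = [] := by
        rw [hm2]
        exact bGo_no_close _ (by simp [hm1])
      simp [goA, hb, finishSegs]
  | cons c rest' IH =>
    intro i start h ip b hdrop hinv
    have hdrop' : cs.drop (i+1) = rest' := by
      have h1 : List.drop 1 (List.drop i cs) = List.drop (i+1) cs := List.drop_drop
      rw [hdrop] at h1
      simpa using h1.symm
    by_cases hc : c = '('
    · subst hc
      match start with
      | none =>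
        have hIH := IH (i+1) (some i) h ip b hdrop'
          (by
            intro s hs; injection hs with hs; subst hs
            exact ⟨[], by simp, by simpa using hdrop, by simp⟩)
        simp only [goA, reduceIte]
        rw [hIH]
        exact congrArg (finishSegs h ip b) (congrArg bGo hdrop)
      | some s =>
        obtain ⟨mid, hm1, hm2, hm3⟩ := hinv s rfl
        have hIH := IH (i+1) (some s) h ip b hdrop'
          (by
            intro s' hs'; injection hs' with hs'; subst hs'
            refine ⟨mid ++ ['('], ?_, ?_, ?_⟩
            · simp [hm1]
            · simpa [List.append_assoc] using hm2
            · simp [hm3]; omega)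
        simp only [goA, reduceIte, reduceCtorEq]
        exact hIH
    · by_cases hc2 : c = ')'
      · subst hc2
        match start with
        | none =>
          have hIH := IH (i+1) none h ip b hdrop' (by intro s hs; cases hs)
          simp only [goA, if_neg hc, reduceIte]
          rw [hIH, bGo_cons_ne ')' rest' (by decide)]
        | some s =>
          obtain ⟨mid, hm1, hm2, hm3⟩ := hinv s rfl
          have hseg : PySem.List.slice cs (some (s : Int)) (some ((i : Int) + 1)) =
              '(' :: (mid ++ [')']) := by
            have hcast : ((i : Int) + 1) = (((i + 1 : Nat)) : Int) := by push_cast; ring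
            rw [hcast, PySem.List.slice_natCast]
            rw [hm2]
            have hl : i + 1 - s = (mid.length + 1) + 1 := by omega
            rw [hl]
            simp only [List.take_succ_cons, List.take_append]
            rw [List.take_of_length_le (by omega)]
            simp
          have hIH0 := IH (i+1) none h (ip ++ [String.ofList ('(' :: (mid ++ [')']))]) b hdrop'
            (by intro s hs; cases hs)
          have hIH1 := IH (i+1) none (h ++ [String.ofList ('(' :: (mid ++ [')']))]) ip b hdrop'
            (by intro s hs; cases hs)
          simp only [goA, if_neg hc, reduceIte, hseg]
          rw [hm2, bGo_open_close mid rest' hm1, finishSegs_step]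
          by_cases hcnt : 2 ≤ PySem.Chars.count ('(' :: (mid ++ [')'])) ['.']
          · have hmem : (PySem.Chars.isIn ['('] ('(' :: (mid ++ [')'])) &&
                PySem.Chars.isIn [')'] ('(' :: (mid ++ [')']))) = true := by
              rw [Bool.and_eq_true]
              constructor
              · exact (PySem.Chars.isIn_iff_infix _ _).mpr
                  (singleton_infix_of_mem List.mem_cons_self)
              · exact (PySem.Chars.isIn_iff_infix _ _).mpr
                  (singleton_infix_of_mem
                    (List.mem_cons_of_mem _ (List.mem_append_right _ (by simp))))
            rw [if_pos hcnt, if_pos hmem, if_pos hcnt]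
            exact hIH0
          · rw [if_neg hcnt, if_neg hcnt]
            exact hIH1
      · match start with
        | none =>
          have hIH := IH (i+1) none h ip b hdrop' (by intro s hs; cases hs)
          simp only [goA, if_neg hc, if_neg hc2]
          rw [hIH, bGo_cons_ne c rest' hc]
        | some s =>
          obtain ⟨mid, hm1, hm2, hm3⟩ := hinv s rfl
          have hIH := IH (i+1) (some s) h ip b hdrop'
            (by
              intro s' hs'; injection hs' with hs'; subst hs'
              refine ⟨mid ++ [c], ?_, ?_, ?_⟩
              · simp [hm1]; exact fun he => hc2 he.symm
              · simpa [List.append_assoc] using hm2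
              · simp; omega)
          simp only [goA, if_neg hc, if_neg hc2]
          exact hIH

-- ===== VERDICT (by name: the statement is the Claim_ definition above) =====
theorem extract_substructures_spec : Claim_equal_extract_substructures := by
  intro sequence _
  unfold Spec_extract_substructures extract_substructures extract_substructures_alt
  rw [goA_eq sequence.toList sequence.toList 0 none [] [] [] (by simp)
      (by intro s hs; cases hs)]
  have hsegs : List.foldl bStep [] (mySplit sequence.toList).dropLast =
      List.map String.ofList (bGo sequence.toList) := by
    simpa using segs_from sequence.toList []
  simp only [splitOn_eq_mySplit, hsegs, finishSegs, classify_foldl, List.nil_append,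
    List.filter_map]
  simp [Function.comp_def, PySem.Str.count_eq, String.toList_ofList]
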